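-- pv_equiv track=rewrite | github.com/Sathishr424/LeetcodeProblems | 2433-FindTheOriginalArrayofPrefixXor/2433-FindTheOriginalArrayofPrefixXor.py | findArray
-- ===== SOURCE A (Python) =====
-- from typing import List
--
-- def findArray(pref: List[int]) -> List[int]:
--     n = len(pref)
--
--     ret = []
--     prev = 0
--
--     for i in range(n):
--         num = prev ^ pref[i]
--         ret.append(num)
--         prev ^= num
--
--     return ret
-- ===== SOURCE B (Python) =====
-- def findArray(pref):
--     # Direct adjacent differencing: ret[0]=pref[0], ret[i]=pref[i]^pref[i-1]; no accumulator state.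
--     if not pref:
--         return []
--     return [pref[0]] + [b ^ a for a, b in zip(pref, pref[1:])]
-- ===== Notes on version B (the rewrite author's own statement) =====
-- stated objective: simpler
-- what changed: Replaces the threaded XOR accumulator `prev` with stateless adjacent differencing: pair pref with its own shift via zip and XOR consecutive prefix values directly.
import Mathlib
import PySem

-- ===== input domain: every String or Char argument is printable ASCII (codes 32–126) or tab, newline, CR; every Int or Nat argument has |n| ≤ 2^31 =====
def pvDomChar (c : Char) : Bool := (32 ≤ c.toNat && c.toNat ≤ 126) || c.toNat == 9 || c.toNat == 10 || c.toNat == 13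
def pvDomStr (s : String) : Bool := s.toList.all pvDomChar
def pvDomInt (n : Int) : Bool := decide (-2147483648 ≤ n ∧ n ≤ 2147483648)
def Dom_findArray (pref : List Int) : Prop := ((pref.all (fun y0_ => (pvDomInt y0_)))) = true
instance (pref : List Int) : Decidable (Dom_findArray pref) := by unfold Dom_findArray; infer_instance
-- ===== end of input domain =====

-- B removes A's running accumulator: each output is the XOR of two adjacent prefix values (simpler decomposition, same cost).


-- ===== PORT A =====
-- for i in range(n): num = prev ^ pref[i]; ret.append(num); prev ^= num
def findArray (pref : List Int) : List Int :=
  let n : Int := pref.length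
  let r :=
    (PySem.List.pyRange 0 n 1).foldl
      (fun (s : List Int × Int) i =>
        let num := PySem.Int.bxor s.2 (PySem.List.pyGetD pref i 0)
        (s.1 ++ [num], PySem.Int.bxor s.2 num))
      ([], 0)
  r.1

-- ===== PORT B =====
-- if not pref: return [];  [pref[0]] + [b ^ a for a, b in zip(pref, pref[1:])]
def findArray_alt (pref : List Int) : List Int :=
  match pref with
  | [] => []
  | x :: xs => x :: (List.zip (x :: xs) xs).map (fun p => PySem.Int.bxor p.2 p.1)

-- ===== PRECONDITION & SPEC =====
def Spec_findArray (pref : List Int) (out : List Int) : Prop := out = findArray_alt pref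
instance (pref : List Int) (out : List Int) : Decidable (Spec_findArray pref out) := by unfold Spec_findArray; infer_instance

-- ===== CLAIM (what is proved, stated in full; the proofs are below) =====
def Claim_equal_findArray : Prop := ∀ (pref : List Int), Dom_findArray pref → Spec_findArray pref (findArray pref)

-- ===== LEMMAS AND PROOFS =====

-- XOR cancellation for Python's signed bitwise XOR: a ^ (a ^ b) = b
theorem pv_bxor_cancel (a b : Int) : PySem.Int.bxor a (PySem.Int.bxor a b) = b := by
  unfold PySem.Int.bxor
  by_cases ha : (0:Int) ≤ a <;> by_cases hb : (0:Int) ≤ b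
  · simp [ha, hb, Int.toNat_natCast]
  · have h1 : ¬ (0 ≤ b) := by omega
    have h2 : ¬ (0 ≤ -(↑(a.toNat ^^^ (-b - 1).toNat) : Int) - 1) := by omega
    simp only [if_pos ha, if_neg h1, if_neg h2]
    have : (-(-(↑(a.toNat ^^^ (-b - 1).toNat) : Int) - 1) - 1) = ↑(a.toNat ^^^ (-b - 1).toNat) := by ring
    rw [this]
    simp
    omega
  · have h1 : ¬ (0 ≤ a) := by omega
    have h2 : ¬ (0 ≤ -(↑((-a - 1).toNat ^^^ b.toNat) : Int) - 1) := by omega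
    simp only [if_neg h1, if_pos hb, if_neg h2]
    have : (-(-(↑((-a - 1).toNat ^^^ b.toNat) : Int) - 1) - 1) = ↑((-a - 1).toNat ^^^ b.toNat) := by ring
    rw [this]
    simp
    omega
  · have h1 : ¬ (0 ≤ a) := by omega
    have h2 : ¬ (0 ≤ b) := by omega
    have h3 : (0 : Int) ≤ ↑((-a - 1).toNat ^^^ (-b - 1).toNat) := by positivity
    simp only [if_neg h1, if_neg h2, if_pos h3]
    simp
    omega

-- the values A's loop appends, with the updated prev simplified by cancellation to the element itself
def pvAdj (prev : Int) : List Int → List Int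
  | [] => []
  | x :: xs => PySem.Int.bxor prev x :: pvAdj x xs

-- the final value of prev (last element, or the initial prev for the empty list)
def pvLast (prev : Int) : List Int → Int
  | [] => prev
  | x :: xs => pvLast x xs

theorem pvA_loop (l : List Int) : ∀ (acc : List Int) (prev : Int),
    (l.foldl
      (fun (s : List Int × Int) x =>
        let num := PySem.Int.bxor s.2 x
        (s.1 ++ [num], PySem.Int.bxor s.2 num))
      (acc, prev)) = (acc ++ pvAdj prev l, pvLast prev l) := by
  induction l with
  | nil => simp [pvAdj, pvLast]
  | cons x xs ih =>
    intro acc prev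
    rw [List.foldl_cons,
      show (let num := PySem.Int.bxor ((acc, prev) : List Int × Int).2 x
          (((acc, prev) : List Int × Int).1 ++ [num], PySem.Int.bxor ((acc, prev) : List Int × Int).2 num))
        = (acc ++ [PySem.Int.bxor prev x], x) from by simp [pv_bxor_cancel],
      ih]
    simp [pvAdj, pvLast]

theorem pvAdj_eq_zip (x : Int) (xs : List Int) :
    pvAdj x xs = (List.zip (x :: xs) xs).map (fun p => PySem.Int.bxor p.2 p.1) := by
  induction xs generalizing x with
  | nil => simp [pvAdj]
  | cons y ys ih => simp [pvAdj, ih, PySem.Int.bxor_comm]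

-- ===== VERDICT (by name: the statement is the Claim_ definition above) =====
theorem findArray_spec : Claim_equal_findArray := by
  intro pref _
  unfold Spec_findArray findArray findArray_alt
  show ((PySem.List.pyRange 0 (pref.length : Int) 1).foldl
      (fun (s : List Int × Int) i =>
        let num := PySem.Int.bxor s.2 (PySem.List.pyGetD pref i 0)
        (s.1 ++ [num], PySem.Int.bxor s.2 num))
      ([], 0)).1 = _
  rw [PySem.List.foldl_pyRange_zero_pyGetD' pref 0
      (fun (s : List Int × Int) x =>
        let num := PySem.Int.bxor s.2 x
        (s.1 ++ [num], PySem.Int.bxor s.2 num)) ([], (0 : Int))]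
  rw [pvA_loop]
  cases pref with
  | nil => simp [pvAdj]
  | cons x xs =>
    simp only [List.nil_append, pvAdj, pvAdj_eq_zip]
    congr 1
    simp [PySem.Int.bxor_comm]
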